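-- pv_equiv track=rewrite | github.com/gdh0730/algorithm-study | 5주차/피보나치 함수-1003.py | fibonacci_counts
-- ===== SOURCE A (Python) =====
-- def fibonacci_counts(max_n=40):
--     # 최대 N까지의 0과 1 출력 횟수를 저장할 리스트
--     count_zero = [0] * (max_n + 1)
--     count_one = [0] * (max_n + 1)
--
--     # 초기 조건 설정
--     count_zero[0] = 1
--     count_one[0] = 0
--     count_zero[1] = 0
--     count_one[1] = 1
--
--     # DP 테이블 채우기
--     for n in range(2, max_n + 1):
--         count_zero[n] = count_zero[n - 1] + count_zero[n - 2]
--         count_one[n] = count_one[n - 1] + count_one[n - 2]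
--
--     return count_zero, count_one
-- ===== SOURCE B (Python) =====
-- def fibonacci_counts(max_n=40):
--     # Build only the '1'-count Fibonacci sequence with a rolling pair,
--     # then obtain the '0'-counts as its shift: count_zero[n] = count_one[n-1], count_zero[0] = 1.
--     count_one = [0, 1]
--     a, b = 0, 1
--     for _ in range(2, max_n + 1):
--         a, b = b, a + b
--         count_one.append(b)
--     count_zero = [1] + count_one[:-1]
--     return count_zero, count_one
-- ===== Notes on version B (the rewrite author's own statement) =====
-- stated objective: simpler
-- what changed: B maintains a single Fibonacci sequence with a rolling pair and appends, then derives count_zero as [1] + count_one[:-1] (a shift), instead of preallocating and index-filling two parallel DP arrays.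
-- outside the precondition, e.g. on fibonacci_counts(0): A raises IndexError, B returns ([1, 0], [0, 1])
import Mathlib
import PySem

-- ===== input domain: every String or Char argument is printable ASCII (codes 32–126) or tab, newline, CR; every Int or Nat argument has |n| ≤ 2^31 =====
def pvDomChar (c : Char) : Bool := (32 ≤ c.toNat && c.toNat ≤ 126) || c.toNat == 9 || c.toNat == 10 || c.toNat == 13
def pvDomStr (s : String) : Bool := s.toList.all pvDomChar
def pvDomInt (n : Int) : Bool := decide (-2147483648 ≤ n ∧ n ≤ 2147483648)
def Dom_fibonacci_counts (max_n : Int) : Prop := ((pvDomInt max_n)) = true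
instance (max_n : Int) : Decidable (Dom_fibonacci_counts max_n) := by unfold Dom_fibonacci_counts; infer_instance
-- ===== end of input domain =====

-- B replaces A's two preallocated index-filled DP arrays by one appended Fibonacci list
-- (rolling pair) plus a shift: count_zero = [1] + count_one[:-1]  (objective: simpler).

-- ===== PORT A =====
-- list assignment l[i] = v and reads l[i] are via pySetD/pyGetD; Python raises out of
-- range (max_n < 1), those inputs are excluded by Pre_.
def fibonacci_counts (max_n : Int) : List Int × List Int :=
  let count_zero := List.replicate (max_n + 1).toNat (0 : Int)
  let count_one := List.replicate (max_n + 1).toNat (0 : Int)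
  let count_zero := PySem.List.pySetD count_zero 0 1
  let count_one := PySem.List.pySetD count_one 0 0
  let count_zero := PySem.List.pySetD count_zero 1 0
  let count_one := PySem.List.pySetD count_one 1 1
  (PySem.List.pyRange 2 (max_n + 1) 1).foldl
    (fun (s : List Int × List Int) n =>
      let cz := PySem.List.pySetD s.1 n
        (PySem.List.pyGetD s.1 (n - 1) 0 + PySem.List.pyGetD s.1 (n - 2) 0)
      let co := PySem.List.pySetD s.2 n
        (PySem.List.pyGetD s.2 (n - 1) 0 + PySem.List.pyGetD s.2 (n - 2) 0)
      (cz, co))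
    (count_zero, count_one)

-- ===== PORT B =====
def fibonacci_counts_alt (max_n : Int) : List Int × List Int :=
  let s := (PySem.List.pyRange 2 (max_n + 1) 1).foldl
    (fun (s : List Int × Int × Int) _ =>
      -- a, b = b, a + b; count_one.append(b)
      (s.1 ++ [s.2.1 + s.2.2], s.2.2, s.2.1 + s.2.2))
    ([0, 1], 0, 1)
  ([1] ++ PySem.List.slice s.1 none (some (-1)), s.1)

-- ===== PRECONDITION & SPEC =====
-- Pre_ excludes exactly max_n ≤ 0, on which A raises IndexError (count_zero[1] = 0 on a
-- list of length ≤ 1).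
def Pre_fibonacci_counts (max_n : Int) : Prop := 1 ≤ max_n
instance (max_n : Int) : Decidable (Pre_fibonacci_counts max_n) := by unfold Pre_fibonacci_counts; infer_instance
def pvWitness_fibonacci_counts : Int := (5)

def Spec_fibonacci_counts (max_n : Int) (out : List Int × List Int) : Prop := out = fibonacci_counts_alt max_n
instance (max_n : Int) (out : List Int × List Int) : Decidable (Spec_fibonacci_counts max_n out) := by unfold Spec_fibonacci_counts; infer_instance

-- ===== CLAIM (what is proved, stated in full; the proofs are below) =====
def Claim_equal_fibonacci_counts : Prop := ∀ (max_n : Int), Dom_fibonacci_counts max_n → Pre_fibonacci_counts max_n → Spec_fibonacci_counts max_n (fibonacci_counts max_n)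

-- ===== LEMMAS AND PROOFS =====

-- fib n = count_one[n]; pvZf n = count_zero[n] (the shift of fib, with pvZf 0 = 1)
def pvFib : Nat → Int
  | 0 => 0
  | 1 => 1
  | n + 2 => pvFib n + pvFib (n + 1)

def pvZf : Nat → Int
  | 0 => 1
  | n + 1 => pvFib n

theorem pvFib_rec (k : Nat) : pvFib (k + 2) = pvFib (k + 1) + pvFib k := by
  show pvFib k + pvFib (k + 1) = pvFib (k + 1) + pvFib k
  exact add_comm _ _

theorem pvZf_rec (k : Nat) : pvZf (k + 2) = pvZf (k + 1) + pvZf k := by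
  cases k with
  | zero => simp [pvZf, pvFib]
  | succ k => exact pvFib_rec k

theorem pv_getD_map_range_append (f : Nat → Int) (n i : Nat) (t : List Int) (h : i < n) :
    (((List.range n).map f ++ t).getD i 0) = f i := by
  rw [List.getD_eq_getElem?_getD, List.getElem?_append_left (by simpa using h)]
  simp [h]

theorem pv_set_append_cons (l₁ : List Int) (x v : Int) (l₂ : List Int) (n : Nat)
    (h : n = l₁.length) : (l₁ ++ x :: l₂).set n v = l₁ ++ v :: l₂ := by
  subst h
  induction l₁ with
  | nil => simp
  | cons a l ih => simp [ih]

-- one list of the pure shape: map f (range (k+2)) ++ padding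
theorem pv_step_list (f : Nat → Int) (hrec : ∀ k, f (k + 2) = f (k + 1) + f k)
    (k p : Nat) (l : List Int) (hl : l = (List.range (k + 2)).map f ++ List.replicate (p + 1) (0 : Int)) :
    PySem.List.pySetD l (2 + (k : Int))
      (PySem.List.pyGetD l (2 + (k : Int) - 1) 0 + PySem.List.pyGetD l (2 + (k : Int) - 2) 0)
      = (List.range (k + 3)).map f ++ List.replicate p (0 : Int) := by
  subst hl
  have h1 : (2 + (k : Int)) - 1 = ((k + 1 : Nat) : Int) := by omega
  have h2 : (2 + (k : Int)) - 2 = ((k : Nat) : Int) := by omega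
  have h0 : (2 + (k : Int)) = ((k + 2 : Nat) : Int) := by omega
  rw [h1, h2, h0, PySem.List.pySetD_natCast, PySem.List.pyGetD_natCast, PySem.List.pyGetD_natCast]
  rw [pv_getD_map_range_append f (k + 2) (k + 1) _ (by omega),
      pv_getD_map_range_append f (k + 2) k _ (by omega)]
  rw [List.replicate_succ, pv_set_append_cons _ _ _ _ _ (by simp)]
  rw [show k + 3 = (k + 2) + 1 from rfl, List.range_succ, List.map_append, ← hrec k]
  simp [List.range_succ]

-- A's loop invariant
theorem pvA_inv (k p : Nat) :
    (PySem.List.pyRange 2 (2 + (k : Int)) 1).foldl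
      (fun (s : List Int × List Int) n =>
        let cz := PySem.List.pySetD s.1 n
          (PySem.List.pyGetD s.1 (n - 1) 0 + PySem.List.pyGetD s.1 (n - 2) 0)
        let co := PySem.List.pySetD s.2 n
          (PySem.List.pyGetD s.2 (n - 1) 0 + PySem.List.pyGetD s.2 (n - 2) 0)
        (cz, co))
      ((List.range 2).map pvZf ++ List.replicate (k + p) (0 : Int),
       (List.range 2).map pvFib ++ List.replicate (k + p) (0 : Int))
    = ((List.range (k + 2)).map pvZf ++ List.replicate p (0 : Int),
       (List.range (k + 2)).map pvFib ++ List.replicate p (0 : Int)) := by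
  induction k generalizing p with
  | zero => rw [PySem.List.pyRange_one_eq_nil (by omega)]; simp
  | succ k ih =>
    have hsplit : (2 + ((k + 1 : Nat) : Int)) = (2 + (k : Int)) + 1 := by push_cast; ring
    rw [hsplit, PySem.List.pyRange_one_succ_right (by omega), List.foldl_append]
    have hkp : (k + 1) + p = k + (p + 1) := by omega
    rw [hkp, ih (p + 1)]
    simp only [List.foldl_cons, List.foldl_nil]
    rw [pv_step_list pvZf pvZf_rec k p _ rfl, pv_step_list pvFib pvFib_rec k p _ rfl]

-- B's loop: the rolling-pair fold computed in closed form
theorem pvB_inv (k : Nat) :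
    (PySem.List.pyRange 2 (2 + (k : Int)) 1).foldl
      (fun (s : List Int × Int × Int) _ =>
        (s.1 ++ [s.2.1 + s.2.2], s.2.2, s.2.1 + s.2.2))
      ([0, 1], 0, 1)
    = ((List.range (k + 2)).map pvFib, pvFib k, pvFib (k + 1)) := by
  induction k with
  | zero =>
    rw [PySem.List.pyRange_one_eq_nil (by omega)]
    simp [List.range_succ, pvFib]
  | succ k ih =>
    have hsplit : (2 + ((k + 1 : Nat) : Int)) = (2 + (k : Int)) + 1 := by push_cast; ring
    rw [hsplit, PySem.List.pyRange_one_succ_right (by omega), List.foldl_append, ih]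
    simp only [List.foldl_cons, List.foldl_nil]
    have hfib : pvFib k + pvFib (k + 1) = pvFib (k + 2) := rfl
    rw [hfib]
    simp only [Prod.mk.injEq]
    refine ⟨?_, trivial⟩
    rw [show k + 1 + 2 = (k + 2) + 1 from rfl, List.range_succ, List.map_append]
    simp [List.range_succ]

theorem pv_zf_shift (n : Nat) : (List.range (n + 1)).map pvZf = 1 :: (List.range n).map pvFib := by
  rw [List.range_succ_eq_map, List.map_cons, List.map_map]
  simp [pvZf, Function.comp]

theorem pv_final (n : Nat) :
    (List.range (n + 2)).map pvZf = [1] ++ ((List.range (n + 2)).map pvFib).dropLast := by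
  have h1 : ((List.range (n + 2)).map pvFib).dropLast = (List.range (n + 1)).map pvFib := by
    rw [show n + 2 = (n + 1) + 1 from rfl, List.range_succ, List.map_append]
    simp
  rw [h1, pv_zf_shift (n + 1)]
  rfl

-- ===== VERDICT (by name: the statement is the Claim_ definition above) =====
theorem fibonacci_counts_spec : Claim_equal_fibonacci_counts := by
  intro M _ hpre
  have hM : 1 ≤ M := hpre
  unfold Spec_fibonacci_counts fibonacci_counts fibonacci_counts_alt
  dsimp only
  set k : Nat := (M - 1).toNat with hk
  have hM1 : M + 1 = 2 + (k : Int) := by omega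
  rw [hM1, show ((2 : Int) + (k : Int)).toNat = k + 2 from by omega]
  -- initial lists of A after the four assignments
  have hz : PySem.List.pySetD (PySem.List.pySetD (List.replicate (k + 2) (0 : Int)) 0 1) 1 0
      = (List.range 2).map pvZf ++ List.replicate (k + 0) (0 : Int) := by
    rw [PySem.List.pySetD_of_nonneg _ _ (by norm_num : (0 : Int) ≤ 1),
        PySem.List.pySetD_of_nonneg _ _ (by norm_num : (0 : Int) ≤ 0)]
    simp [List.replicate_succ, List.range_succ, pvZf, pvFib]
  have ho : PySem.List.pySetD (PySem.List.pySetD (List.replicate (k + 2) (0 : Int)) 0 0) 1 1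
      = (List.range 2).map pvFib ++ List.replicate (k + 0) (0 : Int) := by
    rw [PySem.List.pySetD_of_nonneg _ _ (by norm_num : (0 : Int) ≤ 1),
        PySem.List.pySetD_of_nonneg _ _ (by norm_num : (0 : Int) ≤ 0)]
    simp [List.replicate_succ, List.range_succ, pvFib]
  rw [hz, ho, pvA_inv k 0, pvB_inv k]
  simp only [List.replicate_zero, List.append_nil]
  rw [PySem.List.slice_to_neg_one, pv_final k]
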